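-- pv_equiv track=rewrite | github.com/Adamp799/advent2025 | day3/part2/algorithm.py | recursive_battery_search
-- ===== SOURCE A (Python) =====
-- def recursive_battery_search(batteries=None, depth=0):
--     if batteries is None or len(batteries) == 0: return 0
--     if depth >= 12: return 0
--     joltage_options = []
--     for i in range(len(batteries)):
--         joltage_options.append(batteries[i] * 10 ** (11 - depth) + recursive_battery_search(batteries[i+1:], depth + 1))
--     cleaned_joltage_options = [int(str(joltage).replace("0", "")) for joltage in joltage_options]
--     return max(cleaned_joltage_options) if cleaned_joltage_options else 0
-- ===== SOURCE B (Python) =====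
-- def recursive_battery_search(batteries=None, depth=0):
--     # Bottom-up DP over (suffix start j, levels used t) instead of A's branching
--     # recursion: row entry t is the best joltage of the suffix at depth (depth + t),
--     # and row[j] = max(strip(option_j), row[j+1]) per entry.  Only t <= j with
--     # depth + t < 12 can matter, so rows are capped at K = 12 - depth entries.
--     if batteries is None or len(batteries) == 0 or depth >= 12:
--         return 0
--
--     def strip(x):
--         return int(str(x).replace("0", ""))
--
--     n = len(batteries)
--     K = 12 - depth
--     row = []  # row for suffix j+1 (empty sentinel for the last suffix)
--     for j in reversed(range(n)):
--         b = batteries[j]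
--         cur = []
--         for t in range(min(j + 1, K)):
--             nxt = row[t + 1] if t + 1 < len(row) else 0
--             v = strip(b * 10 ** (11 - depth - t) + nxt)
--             cur.append(v if j == n - 1 else max(v, row[t]))
--         row = cur
--     return row[0]
-- ===== Notes on version B (the rewrite author's own statement) =====
-- stated objective: alternative
-- what changed: Replaces A's branching recursion over all suffix choices by an iterative bottom-up dynamic program over (suffix start j, levels used t), where each row entry is max(strip(option_j), row[j+1][t]) and rows are capped at 12 - depth entries; Pre_ excludes exactly the inputs where A (and B alike) raises ValueError from int(str(0).replace('0','')).
import Mathlib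
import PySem

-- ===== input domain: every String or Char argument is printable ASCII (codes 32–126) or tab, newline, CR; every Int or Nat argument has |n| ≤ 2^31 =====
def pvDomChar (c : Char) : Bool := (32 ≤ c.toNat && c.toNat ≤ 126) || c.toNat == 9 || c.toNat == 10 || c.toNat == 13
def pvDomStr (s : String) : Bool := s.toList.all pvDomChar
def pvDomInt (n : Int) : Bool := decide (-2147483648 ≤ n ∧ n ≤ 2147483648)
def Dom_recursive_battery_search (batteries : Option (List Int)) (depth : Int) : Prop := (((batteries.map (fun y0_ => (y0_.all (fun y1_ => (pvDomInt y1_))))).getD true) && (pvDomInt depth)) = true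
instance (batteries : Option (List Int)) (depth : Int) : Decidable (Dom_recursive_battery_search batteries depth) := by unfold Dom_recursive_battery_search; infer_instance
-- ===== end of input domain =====

-- B replaces A's branching recursion over all suffix choices by an iterative
-- bottom-up dynamic program over (suffix start, levels used).

-- ===== PORT A =====
-- int(str(x).replace("0", "")): the `.getD 0` fallback is reached only when the
-- digit string becomes empty, i.e. x = 0 — exactly the ValueError inputs Pre_ excludes.
def stripZeros (x : Int) : Int :=
  (PySem.Int.ofStr? (PySem.Str.replace (PySem.Int.toStr x) "0" "")).getD 0

mutual
  -- body of A for batteries ≠ None: empty / depth checks, then max of cleaned options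
  def aGo : List Int → Int → Int
    | [], _ => 0
    | x :: rest, d =>
      if 12 ≤ d then 0
      else
        -- joltage_options for (x :: rest), cleaned, then max(cleaned) (the list is nonempty)
        (PySem.List.max? ((aOpts x rest d).map stripZeros) (fun y => y)).getD 0
  termination_by xs _ => 2 * xs.length + 1

  -- the loop `for i in range(len(batteries)): append(batteries[i] * 10**(11-depth) + rec(batteries[i+1:], depth+1))`
  -- over the list x :: rest; 11 - d ≥ 0 whenever this is reached (d < 12), so .toNat is exact
  def aOpts : Int → List Int → Int → List Int
    | x, [], d => [x * 10 ^ (11 - d).toNat + aGo [] (d + 1)]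
    | x, y :: r, d => (x * 10 ^ (11 - d).toNat + aGo (y :: r) (d + 1)) :: aOpts y r d
  termination_by _ rest _ => 2 * rest.length + 2
end

def recursive_battery_search (batteries : Option (List Int)) (depth : Int) : Int :=
  match batteries with
  | none => 0
  | some xs => aGo xs depth

-- ===== PORT B =====
-- one outer-loop iteration: build the row for suffix j from the row for suffix j+1;
-- row entry t is the best joltage of the suffix at depth (depth + t).
-- batteries[j], row[t] are in range here so getD is exact; row[t+1] is guarded as in Source B.
def bStep (xs : List Int) (n K : Nat) (depth : Int) (row : List Int) (j : Nat) : List Int :=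
  -- `cur = []; for t in range(min(j+1, K)): cur.append(...)` — a map over the range
  (List.range (min (j + 1) K)).map (fun (t : Nat) =>
    let nxt := if t + 1 < row.length then row.getD (t + 1) 0 else 0
    let v := stripZeros (xs.getD j 0 * 10 ^ (11 - depth - (t : Int)).toNat + nxt)
    if j = n - 1 then v else max v (row.getD t 0))

def recursive_battery_search_alt (batteries : Option (List Int)) (depth : Int) : Int :=
  match batteries with
  | none => 0
  | some xs =>
    if xs.length = 0 ∨ 12 ≤ depth then 0
    else
      let n := xs.length
      let K := (12 - depth).toNat   -- 12 - depth > 0 here, so .toNat is exact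
      -- `for j in reversed(range(n)): row = <new row>` starting from the empty sentinel
      (((List.range n).reverse.foldl (bStep xs n K depth) []).getD 0 0)   -- row[0], in range

-- ===== PRECONDITION & SPEC =====
-- Pre_ excludes exactly the inputs on which Python A raises ValueError (int("") in the
-- cleaning step): a zero element at the last position, or a zero element at a position p
-- reachable at depth 11 (p ≥ 11 - depth). B raises there as well, so nothing is hidden.
def Pre_recursive_battery_search (batteries : Option (List Int)) (depth : Int) : Prop :=
  batteries.getD [] = [] ∨ 12 ≤ depth ∨
    ∀ p ∈ (batteries.getD []).zipIdx, p.1 = 0 →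
      (p.2 + 1 ≠ (batteries.getD []).length ∧ (p.2 : Int) < 11 - depth)
instance (batteries : Option (List Int)) (depth : Int) : Decidable (Pre_recursive_battery_search batteries depth) := by
  unfold Pre_recursive_battery_search; infer_instance

def pvWitness_recursive_battery_search : Option (List Int) × Int := (some [3, 1, 2], 0)

def Spec_recursive_battery_search (batteries : Option (List Int)) (depth : Int) (out : Int) : Prop := out = recursive_battery_search_alt batteries depth
instance (batteries : Option (List Int)) (depth : Int) (out : Int) : Decidable (Spec_recursive_battery_search batteries depth out) := by unfold Spec_recursive_battery_search; infer_instance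

-- ===== CLAIM (what is proved, stated in full; the proofs are below) =====
def Claim_equal_recursive_battery_search : Prop := ∀ (batteries : Option (List Int)) (depth : Int), Dom_recursive_battery_search batteries depth → Pre_recursive_battery_search batteries depth → Spec_recursive_battery_search batteries depth (recursive_battery_search batteries depth)

-- ===== LEMMAS AND PROOFS =====

-- equation lemmas for the mutual well-founded definitions
lemma aGo_nil (d : Int) : aGo [] d = 0 := by rw [aGo]

lemma aGo_cons (x : Int) (rest : List Int) (d : Int) :
    aGo (x :: rest) d = if 12 ≤ d then 0
      else (PySem.List.max? ((aOpts x rest d).map stripZeros) (fun y => y)).getD 0 := by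
  conv_lhs => rw [aGo.eq_def]

lemma aOpts_single (x d : Int) :
    aOpts x [] d = [x * 10 ^ (11 - d).toNat + aGo [] (d + 1)] := by
  conv_lhs => rw [aOpts.eq_def]

lemma aOpts_cons (x y : Int) (r : List Int) (d : Int) :
    aOpts x (y :: r) d = (x * 10 ^ (11 - d).toNat + aGo (y :: r) (d + 1)) :: aOpts y r d := by
  conv_lhs => rw [aOpts.eq_def]

lemma aOpts_ne_nil (x : Int) (rest : List Int) (d : Int) : aOpts x rest d ≠ [] := by
  cases rest
  · rw [aOpts_single]; simp
  · rw [aOpts_cons]; simp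

lemma foldl_max_max (l : List Int) (a b : Int) :
    l.foldl max (max a b) = max a (l.foldl max b) := by
  induction l generalizing a b with
  | nil => rfl
  | cons x t ih => simpa [List.foldl_cons, max_assoc] using ih a (max b x)

-- A's value on a singleton
lemma aGo_single (x d : Int) (hd : ¬ 12 ≤ d) :
    aGo [x] d = stripZeros (x * 10 ^ (11 - d).toNat + 0) := by
  rw [aGo_cons, if_neg hd, aOpts_single, aGo_nil]
  simp [PySem.List.max?_id_cons]

-- A's value on a cons with nonempty tail = max of the head option and the tail's value
lemma aGo_cons_decomp (x y : Int) (r : List Int) (d : Int) (hd : ¬ 12 ≤ d) :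
    aGo (x :: y :: r) d =
      max (stripZeros (x * 10 ^ (11 - d).toNat + aGo (y :: r) (d + 1))) (aGo (y :: r) d) := by
  obtain ⟨o, os, h⟩ := List.exists_cons_of_ne_nil (aOpts_ne_nil y r d)
  have hy : aGo (y :: r) d = (os.map stripZeros).foldl max (stripZeros o) := by
    rw [aGo_cons, if_neg hd, h]
    simp only [List.map_cons, PySem.List.max?_id_cons, Option.getD_some]
  rw [aGo_cons, if_neg hd, aOpts_cons, h, hy]
  simp only [List.map_cons, PySem.List.max?_id_cons, Option.getD_some, List.foldl_cons]
  exact foldl_max_max _ _ _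

-- A returns 0 once the depth limit is reached
lemma aGo_ge12 (l : List Int) (d : Int) (hd : 12 ≤ d) : aGo l d = 0 := by
  cases l
  · exact aGo_nil d
  · rw [aGo_cons, if_pos hd]

lemma bStep_length (xs : List Int) (n K : Nat) (depth : Int) (row : List Int) (j : Nat) :
    (bStep xs n K depth row j).length = min (j + 1) K := by
  simp [bStep]

-- the first row (j = n-1, built from the empty sentinel) matches A on the last suffix
lemma bStep_base (xs : List Int) (n K : Nat) (depth : Int)
    (hn : n = xs.length) (hpos : 0 < n) (hK : (K : Int) = 12 - depth) :
    ∀ t : Nat, t < min n K →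
      (bStep xs n K depth [] (n - 1)).getD t 0 = aGo (xs.drop (n - 1)) (depth + (t : Int)) := by
  intro t ht
  have hlt : n - 1 < xs.length := by omega
  have hdrop : xs.drop (n - 1) = [xs[n - 1]] := by
    rw [List.drop_eq_getElem_cons hlt]
    have : xs.drop (n - 1 + 1) = [] := by
      apply List.drop_eq_nil_of_le; omega
    rw [this]
  have hd : ¬ 12 ≤ depth + (t : Int) := by omega
  rw [List.getD_eq_getElem _ _ (by simpa [bStep_length] using (by omega : t < min (n - 1 + 1) K))]
  simp only [bStep, List.getElem_map, List.getElem_range]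
  simp only [List.length_nil, Nat.not_lt_zero, if_false]
  rw [hdrop, aGo_single _ _ hd]
  have hexp : 11 - depth - (t : Int) = 11 - (depth + (t : Int)) := by ring
  simp [hexp, List.getD_eq_getElem?_getD, List.getElem?_eq_getElem hlt]

-- one step of the loop preserves the row invariant
lemma bStep_inv (xs : List Int) (n K : Nat) (depth : Int) (row : List Int) (j : Nat)
    (hn : n = xs.length) (hj : j + 1 < n) (hK : (K : Int) = 12 - depth)
    (hlen : row.length = min (j + 2) K)
    (hrow : ∀ t : Nat, t < min (j + 2) K →
      row.getD t 0 = aGo (xs.drop (j + 1)) (depth + (t : Int))) :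
    ∀ t : Nat, t < min (j + 1) K →
      (bStep xs n K depth row j).getD t 0 = aGo (xs.drop j) (depth + (t : Int)) := by
  intro t ht
  have hjlt : j < xs.length := by omega
  have hd : ¬ 12 ≤ depth + (t : Int) := by omega
  have hdrop : xs.drop j = xs[j] :: xs.drop (j + 1) := List.drop_eq_getElem_cons hjlt
  obtain ⟨y, r, htail⟩ : ∃ y r, xs.drop (j + 1) = y :: r := by
    cases h : xs.drop (j + 1) with
    | nil => exfalso; have := List.length_drop (l := xs) (i := j + 1); rw [h] at this; simp at this; omega
    | cons y r => exact ⟨y, r, rfl⟩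
  have hnxt : (if t + 1 < row.length then row.getD (t + 1) 0 else 0)
      = aGo (xs.drop (j + 1)) (depth + (t : Int) + 1) := by
    by_cases hc : t + 1 < row.length
    · rw [if_pos hc, hrow (t + 1) (by omega)]
      congr 1
      push_cast
      ring
    · rw [if_neg hc]
      have ht1 : (((t + 1 : Nat)) : Int) = 12 - depth := by omega
      rw [aGo_ge12 _ _ (by omega)]
  have hcur : row.getD t 0 = aGo (xs.drop (j + 1)) (depth + (t : Int)) := hrow t (by omega)
  rw [List.getD_eq_getElem _ _ (by simpa [bStep_length] using ht)]
  simp only [bStep, List.getElem_map, List.getElem_range]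
  simp only [if_neg (by omega : ¬ j = n - 1)]
  rw [hnxt, hcur, hdrop, htail, aGo_cons_decomp _ _ _ _ hd]
  have hexp : 11 - depth - (t : Int) = 11 - (depth + (t : Int)) := by ring
  simp [hexp, List.getD_eq_getElem?_getD, List.getElem?_eq_getElem hjlt]

-- running the loop from suffix k down to 0 turns a valid row for k into the row for 0
lemma bFold_inv (xs : List Int) (n K : Nat) (depth : Int)
    (hn : n = xs.length) (hK : (K : Int) = 12 - depth) :
    ∀ (k : Nat) (row : List Int), k < n → row.length = min (k + 1) K →
      (∀ t : Nat, t < min (k + 1) K →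
        row.getD t 0 = aGo (xs.drop k) (depth + (t : Int))) →
      ∀ t : Nat, t < min 1 K →
        ((List.range k).reverse.foldl (bStep xs n K depth) row).getD t 0
          = aGo xs (depth + (t : Int)) := by
  intro k
  induction k with
  | zero => intro row _ _ hrow t ht; simpa using hrow t (by omega)
  | succ k ih =>
    intro row hk hlen hrow t ht
    rw [List.range_succ, List.reverse_append]
    simp only [List.reverse_cons, List.reverse_nil, List.nil_append, List.cons_append,
      List.foldl_cons]
    exact ih (bStep xs n K depth row k) (by omega) (bStep_length xs n K depth row k)
      (bStep_inv xs n K depth row k hn (by omega) hK hlen hrow) t ht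

-- ===== VERDICT (by name: the statement is the Claim_ definition above) =====
theorem recursive_battery_search_spec : Claim_equal_recursive_battery_search := by
  intro batteries depth _hdom _hpre
  unfold Spec_recursive_battery_search
  cases batteries with
  | none => rfl
  | some xs =>
    show aGo xs depth = recursive_battery_search_alt (some xs) depth
    by_cases hnil : xs = []
    · simp [recursive_battery_search_alt, hnil, aGo_nil]
    · by_cases hd12 : 12 ≤ depth
      · simp [recursive_battery_search_alt, hd12, aGo_ge12 _ _ hd12]
      · have hpos : 0 < xs.length := List.length_pos_of_ne_nil hnil
        have hK : (((12 - depth).toNat : Nat) : Int) = 12 - depth := by omega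
        have hcond : ¬ (xs.length = 0 ∨ 12 ≤ depth) := by
          rintro (h | h)
          · omega
          · exact hd12 h
        have hpeel : (List.range xs.length).reverse
            = (xs.length - 1) :: (List.range (xs.length - 1)).reverse := by
          conv_lhs => rw [show xs.length = (xs.length - 1) + 1 by omega]
          rw [List.range_succ, List.reverse_append]
          simp
        have h := bFold_inv xs xs.length ((12 - depth).toNat) depth rfl hK
          (xs.length - 1) (bStep xs xs.length ((12 - depth).toNat) depth [] (xs.length - 1))
          (by omega)
          (bStep_length xs xs.length ((12 - depth).toNat) depth [] (xs.length - 1))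
          (by
            intro t ht
            exact bStep_base xs xs.length ((12 - depth).toNat) depth rfl hpos hK t
              (by omega))
          0 (by omega)
        simp only [recursive_battery_search_alt]
        rw [if_neg hcond, hpeel]
        simp only [List.foldl_cons]
        simpa using h.symm
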